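-- pv_equiv track=rewrite | github.com/qkirikigaku/SigTracer | scripts/utility.py | define_color_list
-- ===== SOURCE A (Python) =====
-- def define_color_list(mt_type = "SBS"):
--     if(mt_type == "SBS"):
--         color_list = ["_" for v in range(96)]
--         for i in range(96):
--             if(i < 16): color_list[i] = "r"
--             elif(i < 32): color_list[i] = "g"
--             elif(i < 48): color_list[i] = "b"
--             elif(i < 64): color_list[i] = "c"
--             elif(i < 80): color_list[i] = "m"
--             else: color_list[i] = "y"
--         return color_list
-- ===== SOURCE B (Python) =====
-- def define_color_list(mt_type = "SBS"):
--     if mt_type == "SBS":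
--         return ["rgbcmy"[i // 16] for i in range(96)]
-- ===== Notes on version B (the rewrite author's own statement) =====
-- stated objective: simpler
-- what changed: Replaces the placeholder-fill plus per-index comparison ladder by a direct arithmetic table lookup: each index i maps to the color character at position i//16 of a six-color lookup table.
import Mathlib
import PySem

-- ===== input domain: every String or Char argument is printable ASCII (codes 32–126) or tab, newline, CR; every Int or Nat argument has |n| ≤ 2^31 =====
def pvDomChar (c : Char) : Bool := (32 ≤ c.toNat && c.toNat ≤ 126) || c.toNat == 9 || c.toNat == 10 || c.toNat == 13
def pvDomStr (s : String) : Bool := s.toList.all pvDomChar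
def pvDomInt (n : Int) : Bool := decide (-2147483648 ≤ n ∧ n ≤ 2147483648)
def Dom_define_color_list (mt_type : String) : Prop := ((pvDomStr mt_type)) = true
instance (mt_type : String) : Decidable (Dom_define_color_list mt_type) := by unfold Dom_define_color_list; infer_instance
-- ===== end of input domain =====

-- B replaces A's per-index comparison ladder by an arithmetic lookup into a six-color table at position i // 16 (objective: simpler).


-- ===== PORT A =====
-- Literal port of A: build 96 "_" entries, then a loop over range(96) assigns each
-- index via the same comparison ladder as the Python.
def define_color_list (mt_type : String) : Option (List String) :=
  if mt_type == "SBS" then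
    let color_list := (PySem.List.pyRange 0 96 1).map (fun _ => "_")
    some ((PySem.List.pyRange 0 96 1).foldl (fun cl i =>
      if i < 16 then cl.set i.toNat "r"
      else if i < 32 then cl.set i.toNat "g"
      else if i < 48 then cl.set i.toNat "b"
      else if i < 64 then cl.set i.toNat "c"
      else if i < 80 then cl.set i.toNat "m"
      else cl.set i.toNat "y") color_list)
  else none

-- ===== PORT B =====
-- Port of B: arithmetic table lookup — index i maps to the color-table character at i // 16.
-- pyGet? is always some here (0 ≤ i//16 < 6); the none branch is unreachable.
def define_color_list_alt (mt_type : String) : Option (List String) :=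
  if mt_type == "SBS" then
    some ((PySem.List.pyRange 0 96 1).map (fun i =>
      match PySem.Str.pyGet? "rgbcmy" (PySem.Int.floordiv i 16) with
      | some c => String.ofList [c]
      | none => ""))
  else none

-- ===== PRECONDITION & SPEC =====
def Spec_define_color_list (mt_type : String) (out : Option (List String)) : Prop := out = define_color_list_alt mt_type
instance (mt_type : String) (out : Option (List String)) : Decidable (Spec_define_color_list mt_type out) := by unfold Spec_define_color_list; infer_instance

-- ===== CLAIM (what is proved, stated in full; the proofs are below) =====
def Claim_equal_define_color_list : Prop := ∀ (mt_type : String), Dom_define_color_list mt_type → Spec_define_color_list mt_type (define_color_list mt_type)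

-- ===== LEMMAS AND PROOFS =====

-- ===== VERDICT (by name: the statement is the Claim_ definition above) =====
theorem define_color_list_spec : Claim_equal_define_color_list := by
  intro mt_type _
  unfold Spec_define_color_list define_color_list define_color_list_alt
  by_cases h : mt_type == "SBS"
  · simp only [h, if_pos]
    set_option maxRecDepth 8000 in decide
  · simp only [h, if_neg, Bool.false_eq_true, not_false_iff]
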